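-- pv_equiv track=rewrite | github.com/ssinghjah/PawPrints | LogAnalyzer/common.py | split_a_sequential_num_range_diverge
-- ===== SOURCE A (Python) =====
-- import math
--
-- def split_a_sequential_num_range_diverge(stop, start=0):
--     mid = math.floor((start + stop)/2)
--     sequence = [start, stop, mid]
--
--     left_len = mid - start
--     right_len = stop - mid
--     for i in range(max(left_len, right_len)):
--         left_val = mid - (i+1)
--         if left_val > start:
--             sequence.append(left_val)
--
--         right_val = mid + (i+1)
--         if right_val < stop:
--             sequence.append(right_val)
--
--     return sequence
-- ===== SOURCE B (Python) =====
-- def split_a_sequential_num_range_diverge(stop, start=0):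
--     mid = (start + stop) // 2
--     # All interior values (strictly between start and stop, excluding mid),
--     # ordered outward from mid: nearer first, and for equal distance the
--     # left (smaller) value first.  Key: doubled distance, +1 on the right side.
--     inner = [v for v in range(start + 1, stop) if v != mid]
--     inner.sort(key=lambda v: 2 * abs(v - mid) + (v > mid))
--     return [start, stop, mid] + inner
-- ===== Notes on version B (the rewrite author's own statement) =====
-- stated objective: alternative
-- what changed: Replaces A's counting loop with guarded appends by a declarative sort: collect all interior values between start and stop (excluding mid) in one comprehension and sort them by the key 2*|v-mid| + (v>mid), which orders them outward from mid with the left value first at each distance.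
import Mathlib
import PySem

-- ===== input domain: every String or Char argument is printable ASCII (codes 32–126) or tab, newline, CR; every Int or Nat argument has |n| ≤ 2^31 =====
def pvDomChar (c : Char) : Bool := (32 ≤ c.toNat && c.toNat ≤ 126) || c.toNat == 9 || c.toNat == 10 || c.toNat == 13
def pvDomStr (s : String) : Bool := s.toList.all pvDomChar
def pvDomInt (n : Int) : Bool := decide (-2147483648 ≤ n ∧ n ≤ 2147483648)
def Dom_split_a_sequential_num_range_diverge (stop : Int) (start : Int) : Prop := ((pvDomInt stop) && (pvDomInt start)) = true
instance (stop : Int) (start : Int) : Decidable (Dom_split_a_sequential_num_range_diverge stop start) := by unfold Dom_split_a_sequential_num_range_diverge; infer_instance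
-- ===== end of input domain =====

-- B replaces A's counting loop with guarded appends by a declarative sort of the interior values under the key 2*|v-mid| + (v>mid) (alternative decomposition, similar cost).


-- ===== PORT A =====
-- mid = math.floor((start+stop)/2): ported as integer floor division, exact on Dom
-- (|start+stop| ≤ 2^32 < 2^53, so the float division is exact and its floor is (start+stop)//2).
def split_a_sequential_num_range_diverge (stop : Int) (start : Int) : List Int :=
  let mid := PySem.Int.floordiv (start + stop) 2
  let leftLen := mid - start
  let rightLen := stop - mid
  (PySem.List.pyRange 0 (max leftLen rightLen) 1).foldl
    (fun seq i =>
      let leftVal := mid - (i + 1)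
      let seq := if leftVal > start then seq ++ [leftVal] else seq
      let rightVal := mid + (i + 1)
      if rightVal < stop then seq ++ [rightVal] else seq)
    [start, stop, mid]

-- ===== PORT B =====
-- Source B's sort key 2*abs(v-mid) + (v > mid), with Python's bool-as-int made explicit.
def pvKey (mid v : Int) : Int := 2 * |v - mid| + (if v > mid then 1 else 0)

def split_a_sequential_num_range_diverge_alt (stop : Int) (start : Int) : List Int :=
  let mid := PySem.Int.floordiv (start + stop) 2
  let inner := (PySem.List.pyRange (start + 1) stop 1).filter (fun v => v != mid)
  let innerSorted := PySem.List.sorted inner (fun v => pvKey mid v) false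
  [start, stop, mid] ++ innerSorted

-- ===== PRECONDITION & SPEC =====
def Spec_split_a_sequential_num_range_diverge (stop : Int) (start : Int) (out : List Int) : Prop := out = split_a_sequential_num_range_diverge_alt stop start
instance (stop : Int) (start : Int) (out : List Int) : Decidable (Spec_split_a_sequential_num_range_diverge stop start out) := by unfold Spec_split_a_sequential_num_range_diverge; infer_instance

-- ===== CLAIM (what is proved, stated in full; the proofs are below) =====
def Claim_equal_split_a_sequential_num_range_diverge : Prop := ∀ (stop : Int) (start : Int), Dom_split_a_sequential_num_range_diverge stop start → Spec_split_a_sequential_num_range_diverge stop start (split_a_sequential_num_range_diverge stop start)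

-- ===== LEMMAS AND PROOFS =====

/-- Perfect interleaving of two lists, left element first at each position. -/
def pvInterleave : List Int → List Int → List Int
  | [], ys => ys
  | x :: xs, [] => x :: xs
  | x :: xs, y :: ys => x :: y :: pvInterleave xs ys

/-- The descending left values: mid-(s+1), mid-(s+2), … (n of them). -/
def pvL (mid : Int) (s n : Nat) : List Int :=
  (List.range' s n).map (fun (k : Nat) => mid - ((k : Int) + 1))

/-- The ascending right values: mid+(s+1), mid+(s+2), … (n of them). -/
def pvR (mid : Int) (s n : Nat) : List Int :=
  (List.range' s n).map (fun (k : Nat) => mid + ((k : Int) + 1))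

lemma pvInterleave_nil_right : ∀ (xs : List Int), pvInterleave xs [] = xs
  | [] => rfl
  | _ :: _ => rfl

lemma pvInterleave_perm : ∀ (xs ys : List Int), (pvInterleave xs ys).Perm (xs ++ ys)
  | [], ys => List.Perm.refl _
  | x :: xs, [] => by simp [pvInterleave]
  | x :: xs, y :: ys => by
      have ih := pvInterleave_perm xs ys
      simpa [pvInterleave] using (((ih.cons y).trans List.perm_middle.symm).cons x)

lemma mem_pvInterleave {x : Int} {xs ys : List Int} :
    x ∈ pvInterleave xs ys ↔ x ∈ xs ∨ x ∈ ys := by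
  rw [(pvInterleave_perm xs ys).mem_iff, List.mem_append]

lemma pvKey_left (mid : Int) (k : Nat) : pvKey mid (mid - ((k : Int) + 1)) = 2 * ((k : Int) + 1) := by
  unfold pvKey
  have h1 : mid - ((k : Int) + 1) - mid = -(((k : Int) + 1)) := by ring
  rw [h1, abs_neg, abs_of_nonneg (by positivity)]
  have h2 : ¬ (mid - ((k : Int) + 1) > mid) := by omega
  simp [h2]

lemma pvKey_right (mid : Int) (k : Nat) : pvKey mid (mid + ((k : Int) + 1)) = 2 * ((k : Int) + 1) + 1 := by
  unfold pvKey
  have h1 : mid + ((k : Int) + 1) - mid = ((k : Int) + 1) := by ring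
  rw [h1, abs_of_nonneg (by positivity)]
  have h2 : mid + ((k : Int) + 1) > mid := by omega
  simp [h2]

lemma pairwise_pvR (mid : Int) : ∀ (m s : Nat),
    (pvR mid s m).Pairwise (fun a b => pvKey mid a < pvKey mid b)
  | 0, s => by simp [pvR]
  | m + 1, s => by
      rw [pvR, List.range'_succ, List.map_cons, List.pairwise_cons]
      refine ⟨?_, pairwise_pvR mid m (s + 1)⟩
      intro b hb
      simp only [List.mem_map, List.mem_range'_1] at hb
      obtain ⟨k, ⟨hk1, _⟩, rfl⟩ := hb
      rw [pvKey_right, pvKey_right]; omega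

lemma pairwise_pvL (mid : Int) : ∀ (n s : Nat),
    (pvL mid s n).Pairwise (fun a b => pvKey mid a < pvKey mid b)
  | 0, s => by simp [pvL]
  | n + 1, s => by
      rw [pvL, List.range'_succ, List.map_cons, List.pairwise_cons]
      refine ⟨?_, pairwise_pvL mid n (s + 1)⟩
      intro b hb
      simp only [List.mem_map, List.mem_range'_1] at hb
      obtain ⟨k, ⟨hk1, _⟩, rfl⟩ := hb
      rw [pvKey_left, pvKey_left]; omega

lemma pairwise_interleave (mid : Int) : ∀ (n m s : Nat),
    (pvInterleave (pvL mid s n) (pvR mid s m)).Pairwise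
      (fun a b => pvKey mid a < pvKey mid b)
  | 0, m, s => by
      simpa [pvL, pvInterleave] using pairwise_pvR mid m s
  | n + 1, 0, s => by
      rw [pvR, List.range'_eq_nil_iff.mpr rfl, List.map_nil, pvInterleave_nil_right]
      exact pairwise_pvL mid (n + 1) s
  | n + 1, m + 1, s => by
      rw [pvL, pvR, List.range'_succ, List.range'_succ, List.map_cons, List.map_cons]
      show List.Pairwise _ (_ :: _ :: pvInterleave (pvL mid (s+1) n) (pvR mid (s+1) m))
      rw [List.pairwise_cons, List.pairwise_cons]
      have hmem : ∀ b ∈ pvInterleave (pvL mid (s+1) n) (pvR mid (s+1) m),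
          2 * ((s : Int) + 1) + 1 < pvKey mid b := by
        intro b hb
        rcases mem_pvInterleave.mp hb with h | h <;>
          · simp only [pvL, pvR, List.mem_map, List.mem_range'_1] at h
            obtain ⟨k, ⟨hk1, _⟩, rfl⟩ := h
            first
              | (rw [pvKey_left]; omega)
              | (rw [pvKey_right]; omega)
      refine ⟨?_, ?_, pairwise_interleave mid n m (s + 1)⟩
      · intro b hb
        rw [pvKey_left]
        rcases List.mem_cons.mp hb with rfl | hb
        · rw [pvKey_right]; omega
        · have := hmem b hb; omega
      · intro b hb
        rw [pvKey_right]
        exact hmem b hb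

/-- A's counting loop, started at index s with m iterations left, appends the
    interleaving of the remaining left and right values. -/
lemma foldA_interleave (mid start stop : Int) :
    ∀ (m s : Nat) (acc : List Int),
    (mid - 1 - start).toNat ≤ s + m → (stop - mid - 1).toNat ≤ s + m →
    (List.range' s m).foldl
      (fun (seq : List Int) (k : Nat) =>
        let leftVal := mid - ((k : Int) + 1)
        let seq := if leftVal > start then seq ++ [leftVal] else seq
        let rightVal := mid + ((k : Int) + 1)
        if rightVal < stop then seq ++ [rightVal] else seq) acc
    = acc ++ pvInterleave
        ((List.range' s ((mid - 1 - start).toNat - s)).map (fun (k : Nat) => mid - ((k : Int) + 1)))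
        ((List.range' s ((stop - mid - 1).toNat - s)).map (fun (k : Nat) => mid + ((k : Int) + 1)))
  | 0, s, acc, hL, hR => by
      have h1 : (mid - 1 - start).toNat - s = 0 := by omega
      have h2 : (stop - mid - 1).toNat - s = 0 := by omega
      rw [h1, h2]
      simp [pvInterleave]
  | m + 1, s, acc, hL, hR => by
      have hlc : (start < mid - ((s : Int) + 1)) ↔ s < (mid - 1 - start).toNat := by omega
      have hrc : (mid + ((s : Int) + 1) < stop) ↔ s < (stop - mid - 1).toNat := by omega
      rw [List.range'_succ, List.foldl_cons]
      rw [foldA_interleave mid start stop m (s + 1) _ (by omega) (by omega)]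
      by_cases hl : s < (mid - 1 - start).toNat <;> by_cases hr : s < (stop - mid - 1).toNat
      · have eL : (mid - 1 - start).toNat - s = ((mid - 1 - start).toNat - (s + 1)) + 1 := by omega
        have eR : (stop - mid - 1).toNat - s = ((stop - mid - 1).toNat - (s + 1)) + 1 := by omega
        rw [eL, eR, List.range'_succ, List.range'_succ]
        simp [hlc.mpr hl, hrc.mpr hr, pvInterleave, gt_iff_lt]
      · have eL : (mid - 1 - start).toNat - s = ((mid - 1 - start).toNat - (s + 1)) + 1 := by omega
        have eR : (stop - mid - 1).toNat - s = 0 := by omega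
        have eR' : (stop - mid - 1).toNat - (s + 1) = 0 := by omega
        rw [eL, List.range'_succ, eR, eR']
        have hrF : ¬ mid + ((s : Int) + 1) < stop := by omega
        simp [hlc.mpr hl, pvInterleave_nil_right, gt_iff_lt, hrF]
      · have eL : (mid - 1 - start).toNat - s = 0 := by omega
        have eL' : (mid - 1 - start).toNat - (s + 1) = 0 := by omega
        have eR : (stop - mid - 1).toNat - s = ((stop - mid - 1).toNat - (s + 1)) + 1 := by omega
        rw [eR, List.range'_succ, eL, eL']
        simp [hrc.mpr hr, pvInterleave, gt_iff_lt, hlc, hl]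
      · have eL : (mid - 1 - start).toNat - s = 0 := by omega
        have eL' : (mid - 1 - start).toNat - (s + 1) = 0 := by omega
        have eR : (stop - mid - 1).toNat - s = 0 := by omega
        have eR' : (stop - mid - 1).toNat - (s + 1) = 0 := by omega
        have hrF : ¬ mid + ((s : Int) + 1) < stop := by omega
        have eR2 : (stop - mid).toNat - 1 - s = 0 := by omega
        have eR2' : (stop - mid).toNat - 1 - (s + 1) = 0 := by omega
        simp [eL, eL', eR2, eR2', gt_iff_lt, hlc, hl, hrF, pvInterleave]

/-- Folding over range(0, n) is folding over the Nat range with a cast. -/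
lemma foldl_pyRange_zero (g : List Int → Int → List Int) (n : Int) (init : List Int) :
    (PySem.List.pyRange 0 n 1).foldl g init
      = (List.range' 0 n.toNat).foldl (fun seq (k : Nat) => g seq (k : Int)) init := by
  rw [PySem.List.pyRange_one, List.foldl_map, List.range_eq_range']
  simp only [Int.sub_zero, zero_add]

/-- B's filtered comprehension is, up to permutation, the interleaving A emits. -/
lemma inner_perm (stop start mid : Int)
    (hmid : 2 * mid ≤ start + stop ∧ start + stop < 2 * mid + 2) :
    (pvInterleave (pvL mid 0 ((mid - 1 - start).toNat))
                  (pvR mid 0 ((stop - mid - 1).toNat))).Perm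
      ((PySem.List.pyRange (start + 1) stop 1).filter (fun v => v != mid)) := by
  rw [PySem.List.pyRange_one]
  by_cases hdeg : start + 1 < stop
  · have hlo : start ≤ mid := by omega
    have hhi : mid < stop := by omega
    by_cases hms : mid = start
    · have hL0 : (mid - 1 - start).toNat = 0 := by omega
      rw [hL0]
      show (pvInterleave [] _).Perm _
      rw [show pvInterleave [] (pvR mid 0 ((stop - mid - 1).toNat))
            = pvR mid 0 ((stop - mid - 1).toNat) from rfl]
      have heq : (List.filter (fun v => v != mid)
            ((List.range (stop - (start + 1)).toNat).map (fun (k : Nat) => start + 1 + (k : Int))))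
          = pvR mid 0 ((stop - mid - 1).toNat) := by
        rw [List.filter_eq_self.mpr ?_]
        · rw [pvR, ← List.range_eq_range',
              show (stop - mid - 1).toNat = (stop - (start + 1)).toNat from by omega]
          exact List.map_congr_left (fun k _ => by omega)
        · intro x hx
          simp only [List.mem_map, List.mem_range] at hx
          obtain ⟨k, _, rfl⟩ := hx
          simp only [bne_iff_ne, ne_eq]
          omega
      exact heq ▸ List.Perm.refl _
    · have hsm : start < mid := by omega
      generalize hn1 : (mid - 1 - start).toNat = n1
      generalize hn2 : (stop - mid - 1).toNat = n2
      have hN : (stop - (start + 1)).toNat = n1 + 1 + n2 := by omega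
      rw [hN, List.range_add, List.range_add, List.map_append, List.map_append,
          List.map_map, List.map_map, List.filter_append, List.filter_append]
      have hb1 : (List.filter (fun v => v != mid)
            ((List.range n1).map (fun (k : Nat) => start + 1 + (k : Int))))
          = (List.range n1).map (fun (k : Nat) => start + 1 + (k : Int)) := by
        apply List.filter_eq_self.mpr
        intro x hx
        simp only [List.mem_map, List.mem_range] at hx
        obtain ⟨k, hk, rfl⟩ := hx
        simp only [bne_iff_ne, ne_eq]
        omega
      have hb2 : (List.filter (fun v => v != mid)
            ((List.range 1).map ((fun (k : Nat) => start + 1 + (k : Int)) ∘ (n1 + ·))))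
          = [] := by
        simp only [List.range_one, List.map_cons, List.map_nil, Function.comp_apply]
        have hv : start + 1 + ((n1 + 0 : Nat) : Int) = mid := by omega
        rw [hv]
        simp
      have hb3 : (List.filter (fun v => v != mid)
            ((List.range n2).map ((fun (k : Nat) => start + 1 + (k : Int)) ∘ (n1 + 1 + ·))))
          = pvR mid 0 n2 := by
        rw [List.filter_eq_self.mpr ?_]
        · rw [pvR, ← List.range_eq_range']
          apply List.map_congr_left
          intro k _
          simp only [Function.comp_apply]
          omega
        · intro x hx
          simp only [List.mem_map, List.mem_range, Function.comp_apply] at hx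
          obtain ⟨k, _, rfl⟩ := hx
          simp only [bne_iff_ne, ne_eq]
          omega
      rw [hb1, hb2, hb3, List.append_nil]
      have hrev : pvL mid 0 n1
          = ((List.range n1).map (fun (k : Nat) => start + 1 + (k : Int))).reverse := by
        apply List.ext_getElem
        · simp [pvL]
        · intro i h1 h2
          have hi : i < n1 := by simpa [pvL] using h1
          simp only [pvL, List.getElem_map, List.getElem_range', List.getElem_reverse,
            List.length_map, List.length_range, List.getElem_range]
          omega
      refine (pvInterleave_perm _ _).trans (List.Perm.append ?_ (List.Perm.refl _))
      rw [hrev]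
      exact List.reverse_perm _
  · have h0 : (stop - (start + 1)).toNat = 0 := by omega
    have hL0 : (mid - 1 - start).toNat = 0 := by omega
    have hR0 : (stop - mid - 1).toNat = 0 := by omega
    rw [h0, hL0, hR0]
    simp [pvL, pvR, pvInterleave]

lemma ports_eq (stop start : Int) :
    split_a_sequential_num_range_diverge stop start
      = split_a_sequential_num_range_diverge_alt stop start := by
  simp only [split_a_sequential_num_range_diverge, split_a_sequential_num_range_diverge_alt]
  have hmidv : PySem.Int.floordiv (start + stop) 2 = (start + stop) / 2 :=
    PySem.Int.floordiv_eq_ediv_of_pos (by omega)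
  have hbounds : 2 * PySem.Int.floordiv (start + stop) 2 ≤ start + stop ∧
      start + stop < 2 * PySem.Int.floordiv (start + stop) 2 + 2 := by
    rw [hmidv]; omega
  rw [foldl_pyRange_zero,
      foldA_interleave (PySem.Int.floordiv (start + stop) 2) start stop _ 0 _ (by omega) (by omega)]
  congr 1
  have hperm := inner_perm stop start (PySem.Int.floordiv (start + stop) 2) hbounds
  have hpw := pairwise_interleave (PySem.Int.floordiv (start + stop) 2)
      ((PySem.Int.floordiv (start + stop) 2 - 1 - start).toNat)
      ((stop - PySem.Int.floordiv (start + stop) 2 - 1).toNat) 0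
  simp only [pvL, pvR] at hperm hpw
  exact (PySem.List.sorted_eq_of_perm_of_pairwise_lt _ _ _ hperm hpw).symm

-- ===== VERDICT (by name: the statement is the Claim_ definition above) =====
theorem split_a_sequential_num_range_diverge_spec : Claim_equal_split_a_sequential_num_range_diverge := by
  intro stop start _
  unfold Spec_split_a_sequential_num_range_diverge
  exact ports_eq stop start
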